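-- pv_equiv track=rewrite | github.com/Madd-ei/CodePath | Unit 3/unit3_advanced2_1.py | predictAdoption_victory
-- ===== SOURCE A (Python) =====
-- def predictAdoption_victory(votes):
--     voters = list(votes)
--
--     i = 0
--     while "C" in voters and "D" in voters:
--         if i == len(voters):
--             i = 0
--
--         if voters[i] == "C" and "D" in voters:
--             voters[voters.index("D")] = "X"
--
--         elif voters[i] == "D" and "C" in voters:
--             voters[voters.index("C")] = "X"
--
--         i += 1
--
--     if "D" in voters:
--         return "Dog Lovers"
--     elif "C" in voters:
--         return "Cat Lovers"
-- ===== SOURCE B (Python) =====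
-- def predictAdoption_victory(votes):
--     # Key fact: A always bans the leftmost surviving opponent, so the banned
--     # voters of each faction are exactly a prefix of that faction (in order).
--     # Hence two ban counters + each voter's rank in its faction fully replace
--     # A's mutable list, membership scans and .index searches.
--     pattern = []
--     p = q = 0
--     for ch in votes:
--         if ch == 'C':
--             pattern.append(('C', p)); p += 1
--         elif ch == 'D':
--             pattern.append(('D', q)); q += 1
--     bc = bd = 0  # number of banned C's / banned D's (always the lowest ranks)
--     while bc < p and bd < q:
--         for kind, r in pattern:
--             if kind == 'C':
--                 if r >= bc:   # this C is still active: ban leftmost D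
--                     bd += 1
--             elif r >= bd:     # this D is still active: ban leftmost C
--                 bc += 1
--     return "Cat Lovers" if bd >= q else "Dog Lovers"
-- ===== Notes on version B (the rewrite author's own statement) =====
-- stated objective: alternative
-- what changed: A simulates bans on a mutable char list with three linear scans (two membership tests and one .index) per step and an index wrapping over the whole string; B observes that bans always remove the lowest-ranked survivor of a faction, so it keeps only two ban counters over a once-built (kind, rank) pattern and plays whole rounds with constant work per voter and no searching or mutation.
-- outside the precondition, e.g. on predictAdoption_victory('xy'): A returns None, B returns 'Cat Lovers'
import Mathlib
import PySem

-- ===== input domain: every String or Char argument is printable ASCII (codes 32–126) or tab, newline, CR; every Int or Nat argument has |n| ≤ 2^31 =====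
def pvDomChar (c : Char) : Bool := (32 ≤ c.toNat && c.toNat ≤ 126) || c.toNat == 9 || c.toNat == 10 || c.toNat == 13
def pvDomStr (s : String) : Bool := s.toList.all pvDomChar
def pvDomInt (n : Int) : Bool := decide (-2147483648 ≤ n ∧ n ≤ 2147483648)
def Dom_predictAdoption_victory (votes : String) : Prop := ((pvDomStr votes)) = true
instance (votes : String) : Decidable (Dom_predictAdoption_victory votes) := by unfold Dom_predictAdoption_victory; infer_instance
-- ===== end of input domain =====

-- B replaces A's mutable voter list (X-marking plus linear `in`/`.index` scans on every
-- step) by two ban counters over a once-built (kind, rank) pattern, so the per-step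
-- list scans disappear; equivalence is proved on every input where A returns a string.

-- ===== PORT A =====

/-- `voters[voters.index(t)] = "X"`: replace the first occurrence of `t` by `'X'`. -/
def replaceFirst : List Char → Char → List Char
  | [], _ => []
  | c :: cs, t => if c = t then 'X' :: cs else c :: replaceFirst cs t

/-- number of `'C'`s plus number of `'D'`s (termination measure only). -/
def cntCD (v : List Char) : Nat := v.count 'C' + v.count 'D'

/-- index of the first `'C'`/`'D'` (termination measure only). -/
def firstCD : List Char → Option Nat
  | [] => none
  | c :: cs => if c = 'C' ∨ c = 'D' then some 0 else (firstCD cs).map (· + 1)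

/-- cyclic distance from position `e` to the next `'C'`/`'D'` (termination measure only). -/
def distCD (v : List Char) (e : Nat) : Nat :=
  match firstCD (v.drop e) with
  | some k => k
  | none => (v.length - e) + ((firstCD v).getD v.length)

/-- termination measure for A's while loop. -/
def aMeasure (v : List Char) (i : Nat) : Nat :=
  cntCD v * (2 * v.length + 2) + distCD v (if v.length ≤ i then 0 else i)

theorem firstCD_cons (c : Char) (cs : List Char) :
    firstCD (c :: cs) = if c = 'C' ∨ c = 'D' then some 0 else (firstCD cs).map (· + 1) := rfl

theorem replaceFirst_length (v : List Char) (t : Char) :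
    (replaceFirst v t).length = v.length := by
  induction v with
  | nil => rfl
  | cons c cs ih => unfold replaceFirst; split <;> simp [ih]

theorem replaceFirst_count_self (v : List Char) (t : Char) (ht : t ≠ 'X') (h : t ∈ v) :
    (replaceFirst v t).count t + 1 = v.count t := by
  induction v with
  | nil => cases h
  | cons c cs ih =>
    unfold replaceFirst
    by_cases hc : c = t
    · subst hc
      simp [List.count_cons, Ne.symm ht]
    · have hm : t ∈ cs := by cases h with
        | head => exact absurd rfl hc
        | tail _ h => exact h
      simp only [if_neg hc, List.count_cons]
      rw [← ih hm]
      omega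

theorem replaceFirst_count_other (v : List Char) (t c : Char) (hx : c ≠ 'X') (hc : c ≠ t) :
    (replaceFirst v t).count c = v.count c := by
  induction v with
  | nil => rfl
  | cons a cs ih =>
    unfold replaceFirst
    by_cases h : a = t
    · subst h
      simp [List.count_cons, Ne.symm hx, Ne.symm hc]
    · rw [if_neg h]
      simp [List.count_cons, ih]

theorem firstCD_le (l : List Char) : (firstCD l).getD l.length ≤ l.length := by
  induction l with
  | nil => simp [firstCD]
  | cons c cs ih =>
    rw [firstCD_cons]
    split
    · simp
    · cases h : firstCD cs with
      | none => simp [h] at ih ⊢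
      | some k => simp [h] at ih ⊢; omega

theorem firstCD_some_le (l : List Char) (k : Nat) (h : firstCD l = some k) : k ≤ l.length := by
  have := firstCD_le l
  rw [h] at this
  simpa using this

theorem distCD_some (v : List Char) (e k : Nat) (h : firstCD (v.drop e) = some k) :
    distCD v e = k := by
  unfold distCD; rw [h]

theorem distCD_none (v : List Char) (e : Nat) (h : firstCD (v.drop e) = none) :
    distCD v e = (v.length - e) + ((firstCD v).getD v.length) := by
  unfold distCD; rw [h]

theorem distCD_le (v : List Char) (e : Nat) : distCD v e ≤ 2 * v.length := by
  cases h : firstCD (v.drop e) with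
  | some k =>
    rw [distCD_some v e k h]
    have hk := firstCD_some_le _ _ h
    rw [List.length_drop] at hk
    omega
  | none =>
    rw [distCD_none v e h]
    have := firstCD_le v
    omega

theorem firstCD_mem (l : List Char) (h : 'C' ∈ l) : ∃ k, firstCD l = some k := by
  induction l with
  | nil => cases h
  | cons c cs ih =>
    rw [firstCD_cons]
    by_cases hc : c = 'C' ∨ c = 'D'
    · exact ⟨0, by simp [hc]⟩
    · have hm : 'C' ∈ cs := by
        cases h with
        | head => exact absurd (Or.inl rfl) hc
        | tail _ h => exact h
      obtain ⟨k, hk⟩ := ih hm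
      exact ⟨k + 1, by simp [hc, hk]⟩

theorem dist_step (v : List Char) (j : Nat) (hj : j < v.length)
    (hC : 'C' ∈ v) (hnc : ¬(v[j] = 'C' ∨ v[j] = 'D')) :
    distCD v (if v.length ≤ j + 1 then 0 else j + 1) + 1 = distCD v j := by
  have hdrop : v.drop j = v[j] :: v.drop (j + 1) := List.drop_eq_getElem_cons hj
  by_cases hend : v.length ≤ j + 1
  · have hjl : j + 1 = v.length := by omega
    have hnil : v.drop (j + 1) = [] := by rw [hjl]; simp
    obtain ⟨k0, hk0⟩ := firstCD_mem v hC
    have h0 : firstCD (v.drop 0) = some k0 := by simpa using hk0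
    have hjnone : firstCD (v.drop j) = none := by
      rw [hdrop, firstCD_cons, if_neg hnc, hnil]; rfl
    rw [if_pos hend, distCD_some v 0 k0 h0, distCD_none v j hjnone, hk0]
    simp only [Option.getD_some]
    omega
  · rw [if_neg hend]
    cases h1 : firstCD (v.drop (j + 1)) with
    | some k =>
      have hjs : firstCD (v.drop j) = some (k + 1) := by
        rw [hdrop, firstCD_cons, if_neg hnc, h1]; rfl
      rw [distCD_some v (j + 1) k h1, distCD_some v j (k + 1) hjs]
    | none =>
      have hjn : firstCD (v.drop j) = none := by
        rw [hdrop, firstCD_cons, if_neg hnc, h1]; rfl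
      rw [distCD_none v (j + 1) h1, distCD_none v j hjn]
      omega

theorem dec_ban (v : List Char) (i i' : Nat) (t : Char)
    (ht : t = 'C' ∨ t = 'D') (hmem : t ∈ v) :
    aMeasure (replaceFirst v t) i' < aMeasure v i := by
  have hlen := replaceFirst_length v t
  have hcnt : cntCD (replaceFirst v t) + 1 = cntCD v := by
    unfold cntCD
    rcases ht with h | h <;> subst h
    · rw [replaceFirst_count_other v 'C' 'D' (by decide) (by decide)]
      have := replaceFirst_count_self v 'C' (by decide) hmem
      omega
    · rw [replaceFirst_count_other v 'D' 'C' (by decide) (by decide)]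
      have := replaceFirst_count_self v 'D' (by decide) hmem
      omega
  have hd1 := distCD_le (replaceFirst v t) (if (replaceFirst v t).length ≤ i' then 0 else i')
  unfold aMeasure
  rw [hlen] at hd1 ⊢
  have h2 : cntCD v * (2 * v.length + 2)
      = cntCD (replaceFirst v t) * (2 * v.length + 2) + (2 * v.length + 2) := by
    rw [← hcnt]; ring
  rw [h2]
  omega

theorem dec_noop (v : List Char) (i : Nat) (hC : 'C' ∈ v)
    (hnc : ¬(v.getD (if v.length ≤ i then 0 else i) ' ' = 'C'
            ∨ v.getD (if v.length ≤ i then 0 else i) ' ' = 'D')) :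
    aMeasure v ((if v.length ≤ i then 0 else i) + 1) < aMeasure v i := by
  have hlen : 0 < v.length := List.length_pos_of_mem hC
  have hj : (if v.length ≤ i then 0 else i) < v.length := by split <;> omega
  have hget : v.getD (if v.length ≤ i then 0 else i) ' ' = v[(if v.length ≤ i then 0 else i)] := by
    rw [List.getD_eq_getElem?_getD, List.getElem?_eq_getElem hj]; rfl
  rw [hget] at hnc
  have hds := dist_step v (if v.length ≤ i then 0 else i) hj hC hnc
  unfold aMeasure
  omega

/-- Port of A's while loop: state = the mutable `voters` list and the index `i`.
`≤` instead of Python's `==` in the wrap test only to make the wrap total for `i > len`,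
which Python never reaches (its `i` is always ≤ len); both agree on all reachable states. -/
def aLoop (voters : List Char) (i : Nat) : String :=
  if hg : 'C' ∈ voters ∧ 'D' ∈ voters then
    let j := if voters.length ≤ i then 0 else i
    if hc : voters.getD j ' ' = 'C' ∧ 'D' ∈ voters then
      aLoop (replaceFirst voters 'D') (j + 1)
    else if hd : voters.getD j ' ' = 'D' ∧ 'C' ∈ voters then
      aLoop (replaceFirst voters 'C') (j + 1)
    else
      aLoop voters (j + 1)
  else if 'D' ∈ voters then "Dog Lovers"
  else if 'C' ∈ voters then "Cat Lovers"
  else ""  -- Python returns None here; excluded by Pre_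
termination_by aMeasure voters i
decreasing_by
  · exact dec_ban voters i _ 'D' (Or.inr rfl) hg.2
  · exact dec_ban voters i _ 'C' (Or.inl rfl) hg.1
  · refine dec_noop voters i hg.1 ?_
    rintro (h | h)
    · exact hc ⟨h, hg.2⟩
    · exact hd ⟨h, hg.1⟩

def predictAdoption_victory (votes : String) : String :=
  aLoop votes.toList 0

-- ===== PORT B =====

/-- one pass over the votes: the `(kind, rank)` pattern plus the two faction sizes. -/
def build : List Char → Nat → Nat → List (Char × Nat) × Nat × Nat
  | [], p, q => ([], p, q)
  | c :: cs, p, q =>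
    if c = 'C' then
      let t := build cs (p + 1) q
      (('C', p) :: t.1, t.2)
    else if c = 'D' then
      let t := build cs p (q + 1)
      (('D', q) :: t.1, t.2)
    else build cs p q

/-- one round: every still-active voter bans the leftmost surviving opponent,
which only bumps the opponent's ban counter. -/
def roundNodes : List (Char × Nat) → Nat → Nat → Nat × Nat
  | [], bc, bd => (bc, bd)
  | (k, r) :: rest, bc, bd =>
    if k = 'C' then roundNodes rest bc (if bc ≤ r then bd + 1 else bd)
    else roundNodes rest (if bd ≤ r then bc + 1 else bc) bd

theorem roundNodes_mono (nodes : List (Char × Nat)) :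
    ∀ bc bd, bc ≤ (roundNodes nodes bc bd).1 ∧ bd ≤ (roundNodes nodes bc bd).2 := by
  induction nodes with
  | nil => intro bc bd; exact ⟨le_refl _, le_refl _⟩
  | cons n rest ih =>
    intro bc bd
    obtain ⟨k, r⟩ := n
    unfold roundNodes
    split
    · have := ih bc (if bc ≤ r then bd + 1 else bd)
      refine ⟨this.1, le_trans ?_ this.2⟩
      split <;> omega
    · have := ih (if bd ≤ r then bc + 1 else bc) bd
      refine ⟨le_trans ?_ this.1, this.2⟩
      split <;> omega

theorem roundNodes_progress (nodes : List (Char × Nat)) :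
    ∀ bc bd, (('C', bc) ∈ nodes ∨ ('D', bd) ∈ nodes) →
      bc + bd < (roundNodes nodes bc bd).1 + (roundNodes nodes bc bd).2 := by
  induction nodes with
  | nil => intro bc bd h; rcases h with h | h <;> cases h
  | cons n rest ih =>
    intro bc bd h
    obtain ⟨k, r⟩ := n
    unfold roundNodes
    by_cases hk : k = 'C'
    · rw [if_pos hk]
      by_cases hr : bc ≤ r
      · rw [if_pos hr]
        have := roundNodes_mono rest bc (bd + 1)
        omega
      · rw [if_neg hr]
        refine ih bc bd ?_
        rcases h with h | h
        · cases h with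
          | head => exact absurd le_rfl hr
          | tail _ h => exact Or.inl h
        · cases h with
          | head => simp_all
          | tail _ h => exact Or.inr h
    · rw [if_neg hk]
      by_cases hr : bd ≤ r
      · rw [if_pos hr]
        have := roundNodes_mono rest (bc + 1) bd
        omega
      · rw [if_neg hr]
        refine ih bc bd ?_
        rcases h with h | h
        · cases h with
          | head => simp_all
          | tail _ h => exact Or.inl h
        · cases h with
          | head => exact absurd le_rfl hr
          | tail _ h => exact Or.inr h

theorem build_counts (l : List Char) : ∀ p q,
    (build l p q).2.1 = p + l.count 'C' ∧ (build l p q).2.2 = q + l.count 'D' := by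
  induction l with
  | nil => intro p q; simp [build]
  | cons c cs ih =>
    intro p q
    unfold build
    by_cases hc : c = 'C'
    · subst hc
      have := ih (p + 1) q
      simp only [if_pos rfl]
      simp only [List.count_cons, this.1, this.2]
      constructor <;> simp <;> omega
    · by_cases hd : c = 'D'
      · subst hd
        have := ih p (q + 1)
        rw [if_neg (by decide : ¬('D' = 'C')), if_pos rfl]
        simp only [List.count_cons, this.1, this.2]
        constructor <;> simp [hc] <;> omega
      · have := ih p q
        rw [if_neg hc, if_neg hd]
        simp only [List.count_cons, this.1, this.2]
        constructor <;> simp [hc, hd]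

theorem build_mem_C (l : List Char) : ∀ p q r, p ≤ r → r < p + l.count 'C' →
    ('C', r) ∈ (build l p q).1 := by
  induction l with
  | nil => intro p q r h1 h2; simp [List.count_nil] at h2; omega
  | cons c cs ih =>
    intro p q r h1 h2
    unfold build
    by_cases hc : c = 'C'
    · subst hc
      rw [if_pos rfl]
      by_cases hr : r = p
      · subst hr; exact List.mem_cons_self
      · refine List.mem_cons_of_mem _ (ih (p + 1) q r (by omega) ?_)
        simp [List.count_cons] at h2
        omega
    · by_cases hd : c = 'D'
      · subst hd
        rw [if_neg (by decide : ¬('D' = 'C')), if_pos rfl]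
        refine List.mem_cons_of_mem _ (ih p (q + 1) r h1 ?_)
        simpa [List.count_cons] using h2
      · rw [if_neg hc, if_neg hd]
        refine ih p q r h1 ?_
        simpa [List.count_cons, hc] using h2

theorem build_mem_D (l : List Char) : ∀ p q r, q ≤ r → r < q + l.count 'D' →
    ('D', r) ∈ (build l p q).1 := by
  induction l with
  | nil => intro p q r h1 h2; simp [List.count_nil] at h2; omega
  | cons c cs ih =>
    intro p q r h1 h2
    unfold build
    by_cases hc : c = 'C'
    · subst hc
      rw [if_pos rfl]
      refine List.mem_cons_of_mem _ (ih (p + 1) q r h1 ?_)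
      simpa [List.count_cons] using h2
    · by_cases hd : c = 'D'
      · subst hd
        rw [if_neg (by decide : ¬('D' = 'C')), if_pos rfl]
        by_cases hr : r = q
        · subst hr; exact List.mem_cons_self
        · refine List.mem_cons_of_mem _ (ih p (q + 1) r (by omega) ?_)
          simp [List.count_cons] at h2
          omega
      · rw [if_neg hc, if_neg hd]
        refine ih p q r h1 ?_
        simpa [List.count_cons, hd] using h2

/-- Port of B's while loop over the two ban counters.  The two membership hypotheses
only justify termination (a round with both factions alive performs at least one ban);
they carry no data. -/
def bOuter (pat : List (Char × Nat)) (p q : Nat)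
    (hC : ∀ r, r < p → ('C', r) ∈ pat) (hD : ∀ r, r < q → ('D', r) ∈ pat)
    (bc bd : Nat) : String :=
  if h : bc < p ∧ bd < q then
    bOuter pat p q hC hD (roundNodes pat bc bd).1 (roundNodes pat bc bd).2
  else if q ≤ bd then "Cat Lovers" else "Dog Lovers"
termination_by (p - bc) + (q - bd)
decreasing_by
  have hm := roundNodes_mono pat bc bd
  have hp := roundNodes_progress pat bc bd (Or.inl (hC bc h.1))
  omega

def predictAdoption_victory_alt (votes : String) : String :=
  bOuter (build votes.toList 0 0).1 (build votes.toList 0 0).2.1 (build votes.toList 0 0).2.2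
    (fun r hr => build_mem_C votes.toList 0 0 r (Nat.zero_le r)
      (by have := (build_counts votes.toList 0 0).1; omega))
    (fun r hr => build_mem_D votes.toList 0 0 r (Nat.zero_le r)
      (by have := (build_counts votes.toList 0 0).2; omega))
    0 0

-- ===== PRECONDITION & SPEC =====

-- Pre_ excludes inputs that contain no voter of either faction (no cat char and no dog
-- char): there Python A falls off the end and returns None, which is not a string.
def Pre_predictAdoption_victory (votes : String) : Prop :=
  'C' ∈ votes.toList ∨ 'D' ∈ votes.toList
instance (votes : String) : Decidable (Pre_predictAdoption_victory votes) := by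
  unfold Pre_predictAdoption_victory; infer_instance

def pvWitness_predictAdoption_victory : String := "CxDDC"

def Spec_predictAdoption_victory (votes : String) (out : String) : Prop := out = predictAdoption_victory_alt votes
instance (votes : String) (out : String) : Decidable (Spec_predictAdoption_victory votes out) := by unfold Spec_predictAdoption_victory; infer_instance

-- ===== CLAIM (what is proved, stated in full; the proofs are below) =====
def Claim_equal_predictAdoption_victory : Prop := ∀ (votes : String), Dom_predictAdoption_victory votes → Pre_predictAdoption_victory votes → Spec_predictAdoption_victory votes (predictAdoption_victory votes)

-- ===== LEMMAS AND PROOFS =====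

-- The bridge: A's list with its first `bc` C's and first `bd` D's overwritten by 'X'.
def markGo : List Char → Nat → Nat → List Char
  | [], _, _ => []
  | c :: cs, bc, bd =>
    if c = 'C' then (if 0 < bc then 'X' else 'C') :: markGo cs (bc - 1) bd
    else if c = 'D' then (if 0 < bd then 'X' else 'D') :: markGo cs bc (bd - 1)
    else c :: markGo cs bc bd

/-- how position `j` of the marked list reads, given the original char and rank counts. -/
def dress (bc bd cC cD : Nat) (c : Char) : Char :=
  if c = 'C' then (if cC < bc then 'X' else 'C')
  else if c = 'D' then (if cD < bd then 'X' else 'D')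
  else c

theorem markGo_consC (cs : List Char) (bc bd : Nat) :
    markGo ('C' :: cs) bc bd = (if 0 < bc then 'X' else 'C') :: markGo cs (bc - 1) bd := by
  conv_lhs => unfold markGo
  rw [if_pos rfl]

theorem markGo_consD (cs : List Char) (bc bd : Nat) :
    markGo ('D' :: cs) bc bd = (if 0 < bd then 'X' else 'D') :: markGo cs bc (bd - 1) := by
  conv_lhs => unfold markGo
  rw [if_neg (by decide : ¬('D' = 'C')), if_pos rfl]

theorem markGo_consO (c : Char) (cs : List Char) (bc bd : Nat) (hc : c ≠ 'C') (hd : c ≠ 'D') :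
    markGo (c :: cs) bc bd = c :: markGo cs bc bd := by
  conv_lhs => unfold markGo
  rw [if_neg hc, if_neg hd]

theorem replaceFirst_cons (a : Char) (cs : List Char) (t : Char) :
    replaceFirst (a :: cs) t = if a = t then 'X' :: cs else a :: replaceFirst cs t := rfl

theorem markGo_zero (l : List Char) : markGo l 0 0 = l := by
  induction l with
  | nil => rfl
  | cons c cs ih =>
    by_cases hc : c = 'C'
    · subst hc; rw [markGo_consC]; simp [ih]
    · by_cases hd : c = 'D'
      · subst hd; rw [markGo_consD]; simp [ih]
      · rw [markGo_consO c cs _ _ hc hd, ih]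

theorem markGo_length (l : List Char) : ∀ bc bd, (markGo l bc bd).length = l.length := by
  induction l with
  | nil => intro _ _; rfl
  | cons c cs ih =>
    intro bc bd
    by_cases hc : c = 'C'
    · subst hc; rw [markGo_consC]; simp [ih]
    · by_cases hd : c = 'D'
      · subst hd; rw [markGo_consD]; simp [ih]
      · rw [markGo_consO c cs _ _ hc hd]; simp [ih]

theorem markGo_memC (l : List Char) : ∀ bc bd, ('C' ∈ markGo l bc bd ↔ bc < l.count 'C') := by
  induction l with
  | nil => intro bc bd; simp [markGo]
  | cons c cs ih =>
    intro bc bd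
    by_cases hc : c = 'C'
    · subst hc
      rw [markGo_consC]
      by_cases hbc : 0 < bc
      · rw [if_pos hbc]
        simp only [List.mem_cons, List.count_cons_self]
        rw [ih (bc - 1) bd]
        constructor
        · rintro (h | h)
          · exact absurd h.symm (by decide)
          · omega
        · intro h; right; omega
      · rw [if_neg hbc]
        have hbc0 : bc = 0 := by omega
        subst hbc0
        simp
    · by_cases hd : c = 'D'
      · subst hd
        rw [markGo_consD]
        have hcnt : ('D' :: cs).count 'C' = cs.count 'C' := by simp [List.count_cons]
        rw [hcnt]
        simp only [List.mem_cons]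
        rw [ih bc (bd - 1)]
        constructor
        · rintro (h | h)
          · exfalso; revert h; split <;> decide
          · exact h
        · intro h; right; exact h
      · rw [markGo_consO c cs _ _ hc hd]
        have hcnt : (c :: cs).count 'C' = cs.count 'C' := by simp [List.count_cons, hc]
        rw [hcnt]
        simp only [List.mem_cons]
        rw [ih bc bd]
        constructor
        · rintro (h | h)
          · exact absurd h.symm hc
          · exact h
        · intro h; right; exact h

theorem markGo_memD (l : List Char) : ∀ bc bd, ('D' ∈ markGo l bc bd ↔ bd < l.count 'D') := by
  induction l with
  | nil => intro bc bd; simp [markGo]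
  | cons c cs ih =>
    intro bc bd
    by_cases hc : c = 'C'
    · subst hc
      rw [markGo_consC]
      have hcnt : ('C' :: cs).count 'D' = cs.count 'D' := by simp [List.count_cons]
      rw [hcnt]
      simp only [List.mem_cons]
      rw [ih (bc - 1) bd]
      constructor
      · rintro (h | h)
        · exfalso; revert h; split <;> decide
        · exact h
      · intro h; right; exact h
    · by_cases hd : c = 'D'
      · subst hd
        rw [markGo_consD]
        by_cases hbd : 0 < bd
        · rw [if_pos hbd]
          simp only [List.mem_cons, List.count_cons_self]
          rw [ih bc (bd - 1)]
          constructor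
          · rintro (h | h)
            · exact absurd h.symm (by decide)
            · omega
          · intro h; right; omega
        · rw [if_neg hbd]
          have hbd0 : bd = 0 := by omega
          subst hbd0
          simp
      · rw [markGo_consO c cs _ _ hc hd]
        have hcnt : (c :: cs).count 'D' = cs.count 'D' := by simp [List.count_cons, hd]
        rw [hcnt]
        simp only [List.mem_cons]
        rw [ih bc bd]
        constructor
        · rintro (h | h)
          · exact absurd h.symm hd
          · exact h
        · intro h; right; exact h

theorem replaceFirst_markGo_D (l : List Char) : ∀ bc bd, bd < l.count 'D' →
    replaceFirst (markGo l bc bd) 'D' = markGo l bc (bd + 1) := by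
  induction l with
  | nil => intro bc bd h; simp [List.count_nil] at h
  | cons c cs ih =>
    intro bc bd h
    by_cases hc : c = 'C'
    · subst hc
      have h' : bd < cs.count 'D' := by simpa [List.count_cons] using h
      rw [markGo_consC, markGo_consC, replaceFirst_cons,
        if_neg (by split <;> decide), ih (bc - 1) bd h']
    · by_cases hd : c = 'D'
      · subst hd
        rw [List.count_cons_self] at h
        rw [markGo_consD, markGo_consD, replaceFirst_cons]
        by_cases hbd : 0 < bd
        · have h2 : bd - 1 < cs.count 'D' := by omega
          rw [ih bc (bd - 1) h2]
          have e1 : bd - 1 + 1 = bd := by omega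
          rw [e1]
          simp [hbd]
        · have hbd0 : bd = 0 := by omega
          subst hbd0
          simp
      · have h' : bd < cs.count 'D' := by simpa [List.count_cons, hd] using h
        rw [markGo_consO c cs _ _ hc hd, markGo_consO c cs _ _ hc hd, replaceFirst_cons,
          if_neg hd, ih bc bd h']

theorem replaceFirst_markGo_C (l : List Char) : ∀ bc bd, bc < l.count 'C' →
    replaceFirst (markGo l bc bd) 'C' = markGo l (bc + 1) bd := by
  induction l with
  | nil => intro bc bd h; simp [List.count_nil] at h
  | cons c cs ih =>
    intro bc bd h
    by_cases hc : c = 'C'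
    · subst hc
      rw [List.count_cons_self] at h
      rw [markGo_consC, markGo_consC, replaceFirst_cons]
      by_cases hbc : 0 < bc
      · have h2 : bc - 1 < cs.count 'C' := by omega
        rw [ih (bc - 1) bd h2]
        have e1 : bc - 1 + 1 = bc := by omega
        rw [e1]
        simp [hbc]
      · have hbc0 : bc = 0 := by omega
        subst hbc0
        simp
    · by_cases hd : c = 'D'
      · subst hd
        have h' : bc < cs.count 'C' := by simpa [List.count_cons] using h
        rw [markGo_consD, markGo_consD, replaceFirst_cons,
          if_neg (by split <;> decide), ih bc (bd - 1) h']
      · have h' : bc < cs.count 'C' := by simpa [List.count_cons, hc] using h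
        rw [markGo_consO c cs _ _ hc hd, markGo_consO c cs _ _ hc hd, replaceFirst_cons,
          if_neg hc, ih bc bd h']

theorem dress_shiftC (bc bd a b : Nat) (x : Char) :
    dress (bc - 1) bd a b x = dress bc bd (a + 1) b x := by
  unfold dress
  split
  · split <;> split <;> first | rfl | omega
  · rfl

theorem dress_shiftD (bc bd a b : Nat) (x : Char) :
    dress bc (bd - 1) a b x = dress bc bd a (b + 1) x := by
  unfold dress
  split
  · rfl
  · split
    · split <;> split <;> first | rfl | omega
    · rfl

theorem markGo_get (l : List Char) : ∀ bc bd j, (markGo l bc bd)[j]? =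
    (l[j]?).map (fun c => dress bc bd ((l.take j).count 'C') ((l.take j).count 'D') c) := by
  induction l with
  | nil => intro bc bd j; simp [markGo]
  | cons c cs ih =>
    intro bc bd j
    cases j with
    | zero =>
      by_cases hc : c = 'C'
      · subst hc
        rw [markGo_consC]
        simp [dress]
      · by_cases hd : c = 'D'
        · subst hd
          rw [markGo_consD]
          simp [dress]
        · rw [markGo_consO c cs _ _ hc hd]
          simp [dress, hc, hd]
    | succ j =>
      by_cases hc : c = 'C'
      · subst hc
        rw [markGo_consC]
        have h1 : ((if 0 < bc then 'X' else 'C') :: markGo cs (bc - 1) bd)[j + 1]?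
            = (markGo cs (bc - 1) bd)[j]? := by simp
        rw [h1, ih (bc - 1) bd j]
        have h2 : (('C' :: cs).take (j + 1)).count 'C' = (cs.take j).count 'C' + 1 := by
          simp [List.take_succ_cons, List.count_cons]
        have h3 : (('C' :: cs).take (j + 1)).count 'D' = (cs.take j).count 'D' := by
          simp [List.take_succ_cons, List.count_cons]
        rw [h2, h3]
        have h4 : (('C' :: cs))[j + 1]? = cs[j]? := by simp
        rw [h4]
        cases hx : cs[j]? with
        | none => simp
        | some x => simp [dress_shiftC]
      · by_cases hd : c = 'D'
        · subst hd
          rw [markGo_consD]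
          have h1 : ((if 0 < bd then 'X' else 'D') :: markGo cs bc (bd - 1))[j + 1]?
              = (markGo cs bc (bd - 1))[j]? := by simp
          rw [h1, ih bc (bd - 1) j]
          have h2 : (('D' :: cs).take (j + 1)).count 'C' = (cs.take j).count 'C' := by
            simp [List.take_succ_cons, List.count_cons]
          have h3 : (('D' :: cs).take (j + 1)).count 'D' = (cs.take j).count 'D' + 1 := by
            simp [List.take_succ_cons, List.count_cons]
          rw [h2, h3]
          have h4 : (('D' :: cs))[j + 1]? = cs[j]? := by simp
          rw [h4]
          cases hx : cs[j]? with
          | none => simp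
          | some x => simp [dress_shiftD]
        · rw [markGo_consO c cs _ _ hc hd]
          have h1 : (c :: markGo cs bc bd)[j + 1]? = (markGo cs bc bd)[j]? := by simp
          rw [h1, ih bc bd j]
          have h2 : ((c :: cs).take (j + 1)).count 'C' = (cs.take j).count 'C' := by
            simp [List.take_succ_cons, List.count_cons, hc]
          have h3 : ((c :: cs).take (j + 1)).count 'D' = (cs.take j).count 'D' := by
            simp [List.take_succ_cons, List.count_cons, hd]
          rw [h2, h3]
          have h4 : ((c :: cs))[j + 1]? = cs[j]? := by simp
          rw [h4]

theorem count_split (l : List Char) (c : Char) (e : Nat) :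
    (l.take e).count c + (l.drop e).count c = l.count c := by
  rw [← List.count_append, List.take_append_drop]

theorem count_take_succ (l : List Char) (c : Char) (j : Nat) (hj : j < l.length) :
    (l.take (j + 1)).count c = (l.take j).count c + (if l[j] = c then 1 else 0) := by
  have h1 : l.take (j + 1) = l.take j ++ [l[j]] := by
    rw [List.take_succ, List.getElem?_eq_getElem hj]
    rfl
  rw [h1, List.count_append]
  simp [List.count_cons, List.count_nil]

theorem round_freezeC (nodes : List (Char × Nat)) :
    ∀ bc bd, (∀ k r, (k, r) ∈ nodes → k = 'C' → r < bc) →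
      (roundNodes nodes bc bd).2 = bd := by
  induction nodes with
  | nil => intro bc bd _; rfl
  | cons n rest ih =>
    intro bc bd h
    obtain ⟨k, r⟩ := n
    unfold roundNodes
    by_cases hk : k = 'C'
    · rw [if_pos hk]
      have hr : r < bc := h k r List.mem_cons_self hk
      rw [if_neg (by omega)]
      exact ih bc bd (fun k' r' hm hk' => h k' r' (List.mem_cons_of_mem _ hm) hk')
    · rw [if_neg hk]
      refine ih _ bd (fun k' r' hm hk' => ?_)
      have := h k' r' (List.mem_cons_of_mem _ hm) hk'
      split <;> omega

theorem round_freezeD (nodes : List (Char × Nat)) :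
    ∀ bc bd, (∀ k r, (k, r) ∈ nodes → k ≠ 'C' → r < bd) →
      (roundNodes nodes bc bd).1 = bc := by
  induction nodes with
  | nil => intro bc bd _; rfl
  | cons n rest ih =>
    intro bc bd h
    obtain ⟨k, r⟩ := n
    unfold roundNodes
    by_cases hk : k = 'C'
    · rw [if_pos hk]
      refine ih bc _ (fun k' r' hm hk' => ?_)
      have := h k' r' (List.mem_cons_of_mem _ hm) hk'
      split <;> omega
    · rw [if_neg hk]
      have hr : r < bd := h k r List.mem_cons_self hk
      rw [if_neg (by omega)]
      exact ih bc bd (fun k' r' hm hk' => h k' r' (List.mem_cons_of_mem _ hm) hk')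

theorem build_mem_char (l : List Char) : ∀ p q k r, (k, r) ∈ (build l p q).1 →
    (k = 'C' ∧ p ≤ r ∧ r < p + l.count 'C') ∨ (k = 'D' ∧ q ≤ r ∧ r < q + l.count 'D') := by
  induction l with
  | nil => intro p q k r h; simp [build] at h
  | cons c cs ih =>
    intro p q k r h
    unfold build at h
    by_cases hc : c = 'C'
    · subst hc
      rw [if_pos rfl] at h
      cases h with
      | head =>
        left
        refine ⟨rfl, le_rfl, ?_⟩
        simp [List.count_cons]
      | tail _ h =>
        rcases ih (p + 1) q k r h with ⟨h1, h2, h3⟩ | ⟨h1, h2, h3⟩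
        · left
          refine ⟨h1, by omega, ?_⟩
          simp [List.count_cons]
          omega
        · right
          refine ⟨h1, h2, ?_⟩
          simpa [List.count_cons] using h3
    · by_cases hd : c = 'D'
      · subst hd
        rw [if_neg (by decide : ¬('D' = 'C')), if_pos rfl] at h
        cases h with
        | head =>
          right
          refine ⟨rfl, le_rfl, ?_⟩
          simp [List.count_cons]
        | tail _ h =>
          rcases ih p (q + 1) k r h with ⟨h1, h2, h3⟩ | ⟨h1, h2, h3⟩
          · left
            refine ⟨h1, h2, ?_⟩
            simpa [List.count_cons] using h3
          · right
            refine ⟨h1, by omega, ?_⟩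
            simp [List.count_cons]
            omega
      · rw [if_neg hc, if_neg hd] at h
        rcases ih p q k r h with ⟨h1, h2, h3⟩ | ⟨h1, h2, h3⟩
        · left
          refine ⟨h1, h2, ?_⟩
          simpa [List.count_cons, hc] using h3
        · right
          refine ⟨h1, h2, ?_⟩
          simpa [List.count_cons, hd] using h3

theorem patC (vl : List Char) : ∀ r, r < vl.count 'C' → ('C', r) ∈ (build vl 0 0).1 :=
  fun r hr => build_mem_C vl 0 0 r (Nat.zero_le r) (by omega)

theorem patD (vl : List Char) : ∀ r, r < vl.count 'D' → ('D', r) ∈ (build vl 0 0).1 :=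
  fun r hr => build_mem_D vl 0 0 r (Nat.zero_le r) (by omega)

theorem bOuter_absorb (pat : List (Char × Nat)) (p q : Nat)
    (hC : ∀ r, r < p → ('C', r) ∈ pat) (hD : ∀ r, r < q → ('D', r) ∈ pat)
    (hk : ∀ k r, (k, r) ∈ pat → (k = 'C' ∧ r < p) ∨ (k ≠ 'C' ∧ r < q))
    (bc bd : Nat) :
    bOuter pat p q hC hD bc bd
      = bOuter pat p q hC hD (roundNodes pat bc bd).1 (roundNodes pat bc bd).2 := by
  by_cases hg : bc < p ∧ bd < q
  · conv_lhs => rw [bOuter]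
    rw [dif_pos hg]
  · have hm := roundNodes_mono pat bc bd
    by_cases hbd : q ≤ bd
    · have h1 : (roundNodes pat bc bd).1 = bc := by
        refine round_freezeD pat bc bd (fun k r hmem hkc => ?_)
        rcases hk k r hmem with ⟨h, _⟩ | ⟨_, h⟩
        · exact absurd h hkc
        · omega
      conv_lhs => rw [bOuter]
      conv_rhs => rw [bOuter]
      rw [dif_neg hg, dif_neg (by omega)]
      rw [if_pos hbd, if_pos (by omega)]
    · have hbc : p ≤ bc := by
        rcases Nat.lt_or_ge bc p with h | h
        · exact absurd ⟨h, by omega⟩ hg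
        · exact h
      have h2 : (roundNodes pat bc bd).2 = bd := by
        refine round_freezeC pat bc bd (fun k r hmem hkc => ?_)
        rcases hk k r hmem with ⟨_, h⟩ | ⟨h, _⟩
        · omega
        · exact absurd hkc h
      conv_lhs => rw [bOuter]
      conv_rhs => rw [bOuter]
      rw [dif_neg hg, dif_neg (by omega)]
      rw [if_neg hbd, if_neg (by omega)]

theorem pat_hk (vl : List Char) : ∀ k r, (k, r) ∈ (build vl 0 0).1 →
    (k = 'C' ∧ r < vl.count 'C') ∨ (k ≠ 'C' ∧ r < vl.count 'D') := by
  intro k r h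
  rcases build_mem_char vl 0 0 k r h with ⟨h1, _, h3⟩ | ⟨h1, _, h3⟩
  · left; exact ⟨h1, by omega⟩
  · right; exact ⟨by rw [h1]; decide, by omega⟩

/-- B's continuation matching A's state: finish the round from position `e`,
then keep playing full rounds. -/
def contFrom (vl : List Char) (i bc bd : Nat) : String :=
  bOuter (build vl 0 0).1 (vl.count 'C') (vl.count 'D') (patC vl) (patD vl)
    (roundNodes (build (vl.drop (if vl.length ≤ i then 0 else i))
        ((vl.take (if vl.length ≤ i then 0 else i)).count 'C')
        ((vl.take (if vl.length ≤ i then 0 else i)).count 'D')).1 bc bd).1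
    (roundNodes (build (vl.drop (if vl.length ≤ i then 0 else i))
        ((vl.take (if vl.length ≤ i then 0 else i)).count 'C')
        ((vl.take (if vl.length ≤ i then 0 else i)).count 'D')).1 bc bd).2

theorem contFrom_succ (vl : List Char) (j bc bd : Nat) (hj : j + 1 ≤ vl.length) :
    contFrom vl (j + 1) bc bd
      = bOuter (build vl 0 0).1 (vl.count 'C') (vl.count 'D') (patC vl) (patD vl)
          (roundNodes (build (vl.drop (j + 1))
              ((vl.take (j + 1)).count 'C') ((vl.take (j + 1)).count 'D')).1 bc bd).1
          (roundNodes (build (vl.drop (j + 1))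
              ((vl.take (j + 1)).count 'C') ((vl.take (j + 1)).count 'D')).1 bc bd).2 := by
  by_cases hend : vl.length ≤ j + 1
  · have hjl : j + 1 = vl.length := by omega
    unfold contFrom
    rw [if_pos hend]
    have hnil : vl.drop (j + 1) = [] := by rw [hjl]; simp
    rw [hnil]
    have hb : (build ([] : List Char) ((vl.take (j + 1)).count 'C')
        ((vl.take (j + 1)).count 'D')).1 = [] := rfl
    rw [hb]
    have hr : roundNodes [] bc bd = (bc, bd) := rfl
    rw [hr]
    have h0 : vl.drop 0 = vl := by simp
    have htc : (vl.take 0).count 'C' = 0 := by simp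
    have htd : (vl.take 0).count 'D' = 0 := by simp
    rw [h0, htc, htd]
    exact (bOuter_absorb (build vl 0 0).1 (vl.count 'C') (vl.count 'D')
      (patC vl) (patD vl) (pat_hk vl) bc bd).symm
  · unfold contFrom
    rw [if_neg hend]

theorem build_consC (cs : List Char) (p q : Nat) :
    build ('C' :: cs) p q = (('C', p) :: (build cs (p + 1) q).1, (build cs (p + 1) q).2) := by
  conv_lhs => unfold build
  rw [if_pos rfl]

theorem build_consD (cs : List Char) (p q : Nat) :
    build ('D' :: cs) p q = (('D', q) :: (build cs p (q + 1)).1, (build cs p (q + 1)).2) := by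
  conv_lhs => unfold build
  rw [if_neg (by decide : ¬('D' = 'C')), if_pos rfl]

theorem build_consO (c : Char) (cs : List Char) (p q : Nat) (hc : c ≠ 'C') (hd : c ≠ 'D') :
    build (c :: cs) p q = build cs p q := by
  conv_lhs => unfold build
  rw [if_neg hc, if_neg hd]

theorem roundNodes_cons (k : Char) (r : Nat) (rest : List (Char × Nat)) (bc bd : Nat) :
    roundNodes ((k, r) :: rest) bc bd
      = if k = 'C' then roundNodes rest bc (if bc ≤ r then bd + 1 else bd)
        else roundNodes rest (if bd ≤ r then bc + 1 else bc) bd := by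
  conv_lhs => unfold roundNodes

/-- processing one position of the round, in B's counter world. -/
theorem step_general (vl : List Char) (j bc bd : Nat) (hj : j < vl.length) :
    roundNodes (build (vl.drop j) ((vl.take j).count 'C') ((vl.take j).count 'D')).1 bc bd
      = if vl[j] = 'C' then
          roundNodes (build (vl.drop (j + 1)) ((vl.take (j + 1)).count 'C')
            ((vl.take (j + 1)).count 'D')).1 bc (if bc ≤ (vl.take j).count 'C' then bd + 1 else bd)
        else if vl[j] = 'D' then
          roundNodes (build (vl.drop (j + 1)) ((vl.take (j + 1)).count 'C')
            ((vl.take (j + 1)).count 'D')).1 (if bd ≤ (vl.take j).count 'D' then bc + 1 else bc) bd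
        else
          roundNodes (build (vl.drop (j + 1)) ((vl.take (j + 1)).count 'C')
            ((vl.take (j + 1)).count 'D')).1 bc bd := by
  have hdrop : vl.drop j = vl[j] :: vl.drop (j + 1) := List.drop_eq_getElem_cons hj
  have htc := count_take_succ vl 'C' j hj
  have htd := count_take_succ vl 'D' j hj
  rw [hdrop, htc, htd]
  by_cases hcc : vl[j] = 'C'
  · rw [hcc, build_consC, roundNodes_cons]
    simp
  · by_cases hdd : vl[j] = 'D'
    · rw [hdd, build_consD, roundNodes_cons]
      simp
    · rw [build_consO vl[j] _ _ _ hcc hdd]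
      simp [hcc, hdd]

theorem aLoop_eq (vl : List Char) : ∀ N i bc bd,
    aMeasure (markGo vl bc bd) i ≤ N →
    (bc < vl.count 'C' ∨ bd < vl.count 'D') →
    aLoop (markGo vl bc bd) i = contFrom vl i bc bd := by
  intro N
  induction N using Nat.strong_induction_on with
  | _ N IH =>
    intro i bc bd hN hne
    have hlen : (markGo vl bc bd).length = vl.length := markGo_length vl bc bd
    by_cases hg : 'C' ∈ markGo vl bc bd ∧ 'D' ∈ markGo vl bc bd
    · have hp : bc < vl.count 'C' := (markGo_memC vl bc bd).mp hg.1
      have hq : bd < vl.count 'D' := (markGo_memD vl bc bd).mp hg.2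
      have hn : 0 < vl.length := by
        have hl := List.length_pos_of_mem hg.1
        omega
      rw [aLoop, dif_pos hg]
      simp only [hlen]
      set j := if vl.length ≤ i then 0 else i with hjdef
      have hj : j < vl.length := by rw [hjdef]; split <;> omega
      have hwrapm : (if (markGo vl bc bd).length ≤ i then 0 else i) = j := by
        rw [hlen, ← hjdef]
      have hget : (markGo vl bc bd).getD j ' '
          = dress bc bd ((vl.take j).count 'C') ((vl.take j).count 'D') vl[j] := by
        rw [List.getD_eq_getElem?_getD, markGo_get vl bc bd j,
          List.getElem?_eq_getElem hj]
        rfl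
      have hcont : contFrom vl i bc bd
          = bOuter (build vl 0 0).1 (vl.count 'C') (vl.count 'D') (patC vl) (patD vl)
              (roundNodes (build (vl.drop j) ((vl.take j).count 'C')
                ((vl.take j).count 'D')).1 bc bd).1
              (roundNodes (build (vl.drop j) ((vl.take j).count 'C')
                ((vl.take j).count 'D')).1 bc bd).2 := by
        unfold contFrom
        rw [← hjdef]
      rw [hcont, step_general vl j bc bd hj]
      by_cases hcc : vl[j] = 'C'
      · rw [if_pos hcc]
        by_cases halive : bc ≤ (vl.take j).count 'C'
        · have hno : ¬((vl.take j).count 'C' < bc) := by omega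
          have hgc : (markGo vl bc bd).getD j ' ' = 'C' := by
            rw [hget, hcc]
            simp [dress, hno]
          rw [dif_pos ⟨hgc, hg.2⟩, replaceFirst_markGo_D vl bc bd hq, if_pos halive,
            ← contFrom_succ vl j bc (bd + 1) hj]
          refine IH (aMeasure (markGo vl bc (bd + 1)) (j + 1)) ?_ (j + 1) bc (bd + 1)
            le_rfl (Or.inl hp)
          have hd := dec_ban (markGo vl bc bd) i (j + 1) 'D' (Or.inr rfl) hg.2
          rw [replaceFirst_markGo_D vl bc bd hq] at hd
          omega
        · have hyes : (vl.take j).count 'C' < bc := by omega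
          have hgc : (markGo vl bc bd).getD j ' ' = 'X' := by
            rw [hget, hcc]
            simp [dress, hyes]
          have hnc1 : ¬((markGo vl bc bd).getD j ' ' = 'C' ∧ 'D' ∈ markGo vl bc bd) := by
            rw [hgc]
            rintro ⟨h, -⟩
            exact absurd h (by decide)
          have hnc2 : ¬((markGo vl bc bd).getD j ' ' = 'D' ∧ 'C' ∈ markGo vl bc bd) := by
            rw [hgc]
            rintro ⟨h, -⟩
            exact absurd h (by decide)
          rw [dif_neg hnc1, dif_neg hnc2, if_neg halive, ← contFrom_succ vl j bc bd hj]
          refine IH (aMeasure (markGo vl bc bd) (j + 1)) ?_ (j + 1) bc bd le_rfl hne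
          have hnoop : ¬((markGo vl bc bd).getD
                (if (markGo vl bc bd).length ≤ i then 0 else i) ' ' = 'C'
              ∨ (markGo vl bc bd).getD
                (if (markGo vl bc bd).length ≤ i then 0 else i) ' ' = 'D') := by
            rw [hwrapm, hgc]
            decide
          have hd := dec_noop (markGo vl bc bd) i hg.1 hnoop
          rw [hwrapm] at hd
          omega
      · rw [if_neg hcc]
        by_cases hdd : vl[j] = 'D'
        · rw [if_pos hdd]
          by_cases halive : bd ≤ (vl.take j).count 'D'
          · have hno : ¬((vl.take j).count 'D' < bd) := by omega
            have hgc : (markGo vl bc bd).getD j ' ' = 'D' := by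
              rw [hget, hdd]
              simp [dress, hno]
            have hnc1 : ¬((markGo vl bc bd).getD j ' ' = 'C' ∧ 'D' ∈ markGo vl bc bd) := by
              rw [hgc]
              rintro ⟨h, -⟩
              exact absurd h (by decide)
            rw [dif_neg hnc1, dif_pos ⟨hgc, hg.1⟩, replaceFirst_markGo_C vl bc bd hp,
              if_pos halive, ← contFrom_succ vl j (bc + 1) bd hj]
            refine IH (aMeasure (markGo vl (bc + 1) bd) (j + 1)) ?_ (j + 1) (bc + 1) bd
              le_rfl (Or.inr hq)
            have hd := dec_ban (markGo vl bc bd) i (j + 1) 'C' (Or.inl rfl) hg.1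
            rw [replaceFirst_markGo_C vl bc bd hp] at hd
            omega
          · have hyes : (vl.take j).count 'D' < bd := by omega
            have hgc : (markGo vl bc bd).getD j ' ' = 'X' := by
              rw [hget, hdd]
              simp [dress, hyes]
            have hnc1 : ¬((markGo vl bc bd).getD j ' ' = 'C' ∧ 'D' ∈ markGo vl bc bd) := by
              rw [hgc]
              rintro ⟨h, -⟩
              exact absurd h (by decide)
            have hnc2 : ¬((markGo vl bc bd).getD j ' ' = 'D' ∧ 'C' ∈ markGo vl bc bd) := by
              rw [hgc]
              rintro ⟨h, -⟩
              exact absurd h (by decide)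
            rw [dif_neg hnc1, dif_neg hnc2, if_neg halive, ← contFrom_succ vl j bc bd hj]
            refine IH (aMeasure (markGo vl bc bd) (j + 1)) ?_ (j + 1) bc bd le_rfl hne
            have hnoop : ¬((markGo vl bc bd).getD
                  (if (markGo vl bc bd).length ≤ i then 0 else i) ' ' = 'C'
                ∨ (markGo vl bc bd).getD
                  (if (markGo vl bc bd).length ≤ i then 0 else i) ' ' = 'D') := by
              rw [hwrapm, hgc]
              decide
            have hd := dec_noop (markGo vl bc bd) i hg.1 hnoop
            rw [hwrapm] at hd
            omega
        · rw [if_neg hdd]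
          have hgc : (markGo vl bc bd).getD j ' ' = vl[j] := by
            rw [hget]
            simp only [dress, if_neg hcc, if_neg hdd]
          have hnc1 : ¬((markGo vl bc bd).getD j ' ' = 'C' ∧ 'D' ∈ markGo vl bc bd) := by
            rw [hgc]
            rintro ⟨h, -⟩
            exact absurd h hcc
          have hnc2 : ¬((markGo vl bc bd).getD j ' ' = 'D' ∧ 'C' ∈ markGo vl bc bd) := by
            rw [hgc]
            rintro ⟨h, -⟩
            exact absurd h hdd
          rw [dif_neg hnc1, dif_neg hnc2, ← contFrom_succ vl j bc bd hj]
          refine IH (aMeasure (markGo vl bc bd) (j + 1)) ?_ (j + 1) bc bd le_rfl hne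
          have hnoop : ¬((markGo vl bc bd).getD
                (if (markGo vl bc bd).length ≤ i then 0 else i) ' ' = 'C'
              ∨ (markGo vl bc bd).getD
                (if (markGo vl bc bd).length ≤ i then 0 else i) ' ' = 'D') := by
            rw [hwrapm, hgc]
            rintro (h | h)
            · exact hcc h
            · exact hdd h
          have hd := dec_noop (markGo vl bc bd) i hg.1 hnoop
          rw [hwrapm] at hd
          omega
    · -- guard false: the loop ends; B's leftover partial round changes nothing relevant
      rw [aLoop, dif_neg hg]
      have hpq : vl.count 'C' ≤ bc ∨ vl.count 'D' ≤ bd := by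
        by_contra hcon
        push_neg at hcon
        exact hg ⟨(markGo_memC vl bc bd).mpr hcon.1, (markGo_memD vl bc bd).mpr hcon.2⟩
      set e := if vl.length ≤ i then 0 else i with hedef
      have hsplitC := count_split vl 'C' e
      have hsplitD := count_split vl 'D' e
      have hcont : contFrom vl i bc bd
          = bOuter (build vl 0 0).1 (vl.count 'C') (vl.count 'D') (patC vl) (patD vl)
              (roundNodes (build (vl.drop e) ((vl.take e).count 'C')
                ((vl.take e).count 'D')).1 bc bd).1
              (roundNodes (build (vl.drop e) ((vl.take e).count 'C')
                ((vl.take e).count 'D')).1 bc bd).2 := by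
        unfold contFrom
        rw [← hedef]
      set nodes := (build (vl.drop e) ((vl.take e).count 'C') ((vl.take e).count 'D')).1
        with hnodes
      have hmono := roundNodes_mono nodes bc bd
      rcases hpq with hbcp | hbdq
      · -- Cat side exhausted: D wins in A; in B no C node can act, bd is frozen
        have hbdlt : bd < vl.count 'D' := by
          rcases hne with h | h
          · omega
          · exact h
        have hfreeze : (roundNodes nodes bc bd).2 = bd := by
          refine round_freezeC nodes bc bd (fun k r hm hk => ?_)
          subst hk
          rcases build_mem_char _ _ _ _ _ hm with ⟨-, h2, h3⟩ | ⟨h1, -, -⟩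
          · omega
          · exact absurd h1 (by decide)
        rw [if_pos ((markGo_memD vl bc bd).mpr hbdlt), hcont]
        conv_rhs => rw [bOuter]
        have hng : ¬((roundNodes nodes bc bd).1 < vl.count 'C'
            ∧ (roundNodes nodes bc bd).2 < vl.count 'D') := by
          rintro ⟨h1, -⟩
          have := hmono.1
          omega
        rw [dif_neg hng]
        have hnd : ¬(vl.count 'D' ≤ (roundNodes nodes bc bd).2) := by
          rw [hfreeze]
          omega
        rw [if_neg hnd]
      · -- Dog side exhausted: in B no D node can act, bc is frozen
        have hbclt : bc < vl.count 'C' := by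
          rcases hne with h | h
          · exact h
          · omega
        have hfreeze : (roundNodes nodes bc bd).1 = bc := by
          refine round_freezeD nodes bc bd (fun k r hm hk => ?_)
          rcases build_mem_char _ _ _ _ _ hm with ⟨h1, -, -⟩ | ⟨-, -, h3⟩
          · exact absurd h1 hk
          · omega
        have hnd : ¬('D' ∈ markGo vl bc bd) := by
          intro hmem
          have := (markGo_memD vl bc bd).mp hmem
          omega
        rw [if_neg hnd, if_pos ((markGo_memC vl bc bd).mpr hbclt), hcont]
        conv_rhs => rw [bOuter]
        have hng : ¬((roundNodes nodes bc bd).1 < vl.count 'C'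
            ∧ (roundNodes nodes bc bd).2 < vl.count 'D') := by
          rintro ⟨-, h2⟩
          have := hmono.2
          omega
        rw [dif_neg hng]
        have hcat : vl.count 'D' ≤ (roundNodes nodes bc bd).2 := by
          have := hmono.2
          omega
        rw [if_pos hcat]

theorem bOuter_congr (pat : List (Char × Nat)) (p q p' q' : Nat)
    (hp : p = p') (hq : q = q')
    (h1 : ∀ r, r < p → ('C', r) ∈ pat) (h2 : ∀ r, r < q → ('D', r) ∈ pat)
    (h1' : ∀ r, r < p' → ('C', r) ∈ pat) (h2' : ∀ r, r < q' → ('D', r) ∈ pat)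
    (bc bd : Nat) :
    bOuter pat p q h1 h2 bc bd = bOuter pat p' q' h1' h2' bc bd := by
  subst hp
  subst hq
  rfl

-- ===== VERDICT (by name: the statement is the Claim_ definition above) =====
theorem predictAdoption_victory_spec : Claim_equal_predictAdoption_victory := by
  intro votes _ hpre
  unfold Spec_predictAdoption_victory
  show predictAdoption_victory votes = predictAdoption_victory_alt votes
  unfold predictAdoption_victory predictAdoption_victory_alt
  have hne : 0 < votes.toList.count 'C' ∨ 0 < votes.toList.count 'D' := by
    rcases hpre with h | h
    · exact Or.inl (List.count_pos_iff.mpr h)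
    · exact Or.inr (List.count_pos_iff.mpr h)
  have h1 := aLoop_eq votes.toList (aMeasure (markGo votes.toList 0 0) 0) 0 0 0 le_rfl hne
  rw [markGo_zero] at h1
  rw [h1]
  unfold contFrom
  rw [show (if votes.toList.length ≤ 0 then 0 else 0) = 0 from by split <;> rfl]
  rw [List.drop_zero, List.take_zero]
  rw [show (List.count 'C' ([] : List Char)) = 0 from rfl,
      show (List.count 'D' ([] : List Char)) = 0 from rfl]
  rw [← bOuter_absorb (build votes.toList 0 0).1 (votes.toList.count 'C')
    (votes.toList.count 'D') (patC votes.toList) (patD votes.toList) (pat_hk votes.toList) 0 0]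
  exact bOuter_congr (build votes.toList 0 0).1 _ _ _ _
    (by have := (build_counts votes.toList 0 0).1; omega)
    (by have := (build_counts votes.toList 0 0).2; omega)
    _ _ _ _ 0 0
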